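-- pv_equiv track=rewrite | github.com/DariiaBabii/First_repo | Module_4/sets.py | is_valid_pin_codes
-- ===== SOURCE A (Python) =====
-- def is_valid_pin_codes(pin_codes):
--     if not pin_codes:
--         return False
--
--     if len(pin_codes) != len(set(pin_codes)):
--         return False
--
--     for i in pin_codes:
--         if len(i) != 4:
--             return False
--
--         if not i.isdigit():
--             return False
--     return True
-- ===== SOURCE B (Python) =====
-- def is_valid_pin_codes(pin_codes):
--     if not pin_codes:
--         return False
--     if not all(len(p) == 4 and p.isdigit() for p in pin_codes):
--         return False
--     s = sorted(pin_codes)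
--     return all(a != b for a, b in zip(s, s[1:]))
-- ===== Notes on version B (the rewrite author's own statement) =====
-- stated objective: alternative
-- what changed: Uniqueness is checked by sorting the list and scanning adjacent pairs for equality, instead of A's hash-set construction and length comparison; validation uses all() over a generator instead of an explicit loop.
import Mathlib
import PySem

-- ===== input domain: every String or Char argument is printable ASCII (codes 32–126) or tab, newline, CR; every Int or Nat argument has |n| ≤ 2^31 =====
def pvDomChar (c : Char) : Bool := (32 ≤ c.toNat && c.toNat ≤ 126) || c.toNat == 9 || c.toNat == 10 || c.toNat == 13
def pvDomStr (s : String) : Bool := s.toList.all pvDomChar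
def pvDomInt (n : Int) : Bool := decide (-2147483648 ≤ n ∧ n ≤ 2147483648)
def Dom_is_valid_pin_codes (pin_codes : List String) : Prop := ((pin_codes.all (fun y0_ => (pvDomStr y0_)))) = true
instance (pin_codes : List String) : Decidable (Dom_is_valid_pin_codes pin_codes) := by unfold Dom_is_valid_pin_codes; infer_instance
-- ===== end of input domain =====

-- B checks uniqueness by sorting and scanning adjacent pairs instead of A's set
-- construction + length comparison (alternative algorithm; no speed claim).

-- ===== PORT A =====
def pvLoopA : List String → Bool
  | [] => true
  | i :: rest =>
    if PySem.Str.len i ≠ 4 then false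
    else if !(PySem.Str.strIsdigit i) then false
    else pvLoopA rest

def is_valid_pin_codes (pin_codes : List String) : Bool :=
  if pin_codes.isEmpty then false
  else if PySem.List.len pin_codes ≠ PySem.Set.len (PySem.Set.ofList pin_codes) then false
  else pvLoopA pin_codes

-- ===== PORT B =====
def is_valid_pin_codes_alt (pin_codes : List String) : Bool :=
  if pin_codes.isEmpty then false
  else if !(pin_codes.all fun p => decide (PySem.Str.len p = 4) && PySem.Str.strIsdigit p) then false
  else
    let s := PySem.List.sorted pin_codes (fun x => x) false
    (s.zip (PySem.List.slice s (some 1) none)).all fun ab => ab.1 != ab.2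

-- ===== PRECONDITION & SPEC =====
def Spec_is_valid_pin_codes (pin_codes : List String) (out : Bool) : Prop := out = is_valid_pin_codes_alt pin_codes
instance (pin_codes : List String) (out : Bool) : Decidable (Spec_is_valid_pin_codes pin_codes out) := by unfold Spec_is_valid_pin_codes; infer_instance

-- ===== CLAIM (what is proved, stated in full; the proofs are below) =====
def Claim_equal_is_valid_pin_codes : Prop := ∀ (pin_codes : List String), Dom_is_valid_pin_codes pin_codes → Spec_is_valid_pin_codes pin_codes (is_valid_pin_codes pin_codes)

-- ===== LEMMAS AND PROOFS =====

def pvValid (s : String) : Bool := decide (PySem.Str.len s = 4) && PySem.Str.strIsdigit s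

theorem pvLoopA_eq (l : List String) : pvLoopA l = l.all pvValid := by
  induction l with
  | nil => rfl
  | cons i rest ih =>
    simp only [pvLoopA, List.all_cons, pvValid]
    split_ifs with h1 h2 <;> simp_all

-- A's set-length test names Nodup
theorem pvOfList_length_iff (l : List String) :
    (PySem.Set.ofList l).length = l.length ↔ l.Nodup := by
  induction l using List.reverseRecOn with
  | nil => simp [PySem.Set.ofList_nil]
  | append_singleton xs x ih =>
    rw [PySem.Set.ofList_append_singleton]
    have hnd : (xs ++ [x]).Nodup ↔ xs.Nodup ∧ x ∉ xs := by
      rw [List.nodup_append_comm]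
      simp [List.nodup_cons, and_comm]
    by_cases hx : x ∈ xs
    · have hadd : PySem.Set.add (PySem.Set.ofList xs) x = PySem.Set.ofList xs := by
        have hc : PySem.Set.contains (PySem.Set.ofList xs) x = true := by
          simp [PySem.Set.mem_ofList, hx]
        simp only [PySem.Set.add]
        rw [hc]
        simp
      rw [hadd, hnd]
      have hle := PySem.Set.length_ofList_le (xs := xs)
      simp only [List.length_append, List.length_cons, List.length_nil]
      constructor
      · omega
      · rintro ⟨-, hnm⟩
        exact absurd hx hnm
    · have hadd : PySem.Set.add (PySem.Set.ofList xs) x = PySem.Set.ofList xs ++ [x] := by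
        have hc : PySem.Set.contains (PySem.Set.ofList xs) x = false := by
          rw [Bool.eq_false_iff]
          intro h
          exact hx ((PySem.Set.mem_ofList xs x).mp ((PySem.Set.contains_iff _ x).mp h))
        simp only [PySem.Set.add]
        rw [hc]
        simp
      rw [hadd, hnd]
      simp only [List.length_append, List.length_cons, List.length_nil]
      constructor
      · intro h
        exact ⟨ih.mp (by omega), hx⟩
      · rintro ⟨h, -⟩
        have := ih.mpr h
        omega

-- B's adjacent scan on a (≤)-sorted list names Nodup
theorem pvAdj_iff (s : List String) (hs : s.Pairwise (· ≤ ·)) :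
    ((s.zip s.tail).all fun ab => ab.1 != ab.2) = true ↔ s.Nodup := by
  induction s with
  | nil => simp
  | cons a t ih =>
    cases t with
    | nil => simp
    | cons b u =>
      have hpt : (b :: u).Pairwise (· ≤ ·) := (List.pairwise_cons.mp hs).2
      have hab : a ≤ b := (List.pairwise_cons.mp hs).1 b (by simp)
      have hbu : ∀ x ∈ u, b ≤ x := fun x hx => (List.pairwise_cons.mp hpt).1 x hx
      simp only [List.tail_cons, List.zip_cons_cons, List.all_cons, Bool.and_eq_true,
        bne_iff_ne, ne_eq]
      simp only [List.tail_cons] at ih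
      rw [ih hpt]
      constructor
      · rintro ⟨hne, hnd⟩
        refine List.nodup_cons.mpr ⟨?_, hnd⟩
        intro hmem
        rcases List.mem_cons.mp hmem with rfl | hmu
        · exact hne rfl
        · have hba : b ≤ a := hbu a hmu
          exact absurd hba (not_le_of_gt (lt_of_le_of_ne hab hne))
      · intro hnd
        have := List.nodup_cons.mp hnd
        exact ⟨fun h => this.1 (h ▸ List.mem_cons_self), this.2⟩

-- ===== VERDICT (by name: the statement is the Claim_ definition above) =====
theorem is_valid_pin_codes_spec : Claim_equal_is_valid_pin_codes := by
  intro l _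
  unfold Spec_is_valid_pin_codes is_valid_pin_codes is_valid_pin_codes_alt
  by_cases hemp : l.isEmpty = true
  · rw [if_pos hemp, if_pos hemp]
  · rw [if_neg hemp, if_neg hemp]
    rw [pvLoopA_eq]
    have hall : (l.all fun p => decide (PySem.Str.len p = 4) && PySem.Str.strIsdigit p) = l.all pvValid := rfl
    set s := PySem.List.sorted l (fun x => x) false with hsdef
    have hperm : s.Perm l := PySem.List.sorted_perm l (fun x => x) false
    have hpw : s.Pairwise (· ≤ ·) := by
      have := PySem.List.sorted_pairwise l (fun x => x)
      simpa using this
    have htail : PySem.List.slice s (some 1) none = s.tail := PySem.List.slice_from_one s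
    have hadj : ((s.zip (PySem.List.slice s (some 1) none)).all fun ab => ab.1 != ab.2)
        = true ↔ l.Nodup := by
      rw [htail, pvAdj_iff s hpw]
      exact hperm.nodup_iff
    have hlen : (PySem.List.len l ≠ PySem.Set.len (PySem.Set.ofList l)) ↔ ¬ l.Nodup := by
      simp only [PySem.List.len, PySem.Set.len, ne_eq]
      constructor
      · intro h hnd; exact h (by rw [(pvOfList_length_iff l).mpr hnd])
      · intro h heq; exact h ((pvOfList_length_iff l).mp (by omega))
    rw [hall]
    by_cases hnd : l.Nodup
    · rw [if_neg (by rw [hlen]; exact fun h => h hnd)]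
      by_cases hv : l.all pvValid = true
      · rw [hv, if_neg (by simp)]
        exact (hadj.mpr hnd).symm
      · simp only [Bool.not_eq_true] at hv
        rw [hv, if_pos (by simp)]
    · rw [if_pos (hlen.mpr hnd)]
      by_cases hv : l.all pvValid = true
      · rw [if_neg (by simp [hv])]
        symm
        rw [Bool.eq_false_iff]
        intro h
        exact hnd (hadj.mp h)
      · simp only [Bool.not_eq_true] at hv
        rw [if_pos (by simp [hv])]
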